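-- pv_equiv track=rewrite | github.com/OliverTaylor246/Bond | apps/runtime.py | _build_exchange_preference
-- ===== SOURCE A (Python) =====
-- BASE_EXCHANGE_PREFERENCE = ["binance", "binanceus", "kraken", "kucoin"]
--
-- def _build_exchange_preference(requested: list[str] | None) -> list[str]:
--   """
--   Build ordered list of exchanges with fallbacks.
--
--   Preference order:
--     1. User-requested exchanges (in provided order)
--     2. Binance
--     3. BinanceUS
--     4. Kraken
--     5. Kucoin (final catch-all)
--   """
--   preference: list[str] = []
--   if requested:
--     for ex in requested:
--       if isinstance(ex, str):
--         ex_lower = ex.lower()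
--         if ex_lower not in preference:
--           preference.append(ex_lower)
--
--   for ex in BASE_EXCHANGE_PREFERENCE:
--     if ex not in preference:
--       preference.append(ex)
--
--   if "kraken" not in preference:
--     preference.append("kraken")
--
--   return preference
-- ===== SOURCE B (Python) =====
-- BASE_EXCHANGE_PREFERENCE = ["binance", "binanceus", "kraken", "kucoin"]
--
-- def _build_exchange_preference(requested):
--     # filter-ahead nub: take the head, erase all its later duplicates, repeat.
--     rest = [ex.lower() for ex in (requested or []) if isinstance(ex, str)]
--     rest += BASE_EXCHANGE_PREFERENCE
--     out = []
--     while rest: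
--         head = rest[0]
--         out.append(head)
--         rest = [x for x in rest[1:] if x != head]
--     return out
-- ===== Notes on version B (the rewrite author's own statement) =====
-- stated objective: alternative
-- what changed: Instead of A's two seen-accumulator loops (membership test against the growing output) plus a trailing 'kraken' guard, B builds one candidate list (lowercased requested then the fixed fallbacks) and applies a filter-ahead nub: repeatedly emit the head and delete all its later duplicates from the remaining list, so no membership test against the output ever occurs and the kraken guard is provably redundant.
import Mathlib
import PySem

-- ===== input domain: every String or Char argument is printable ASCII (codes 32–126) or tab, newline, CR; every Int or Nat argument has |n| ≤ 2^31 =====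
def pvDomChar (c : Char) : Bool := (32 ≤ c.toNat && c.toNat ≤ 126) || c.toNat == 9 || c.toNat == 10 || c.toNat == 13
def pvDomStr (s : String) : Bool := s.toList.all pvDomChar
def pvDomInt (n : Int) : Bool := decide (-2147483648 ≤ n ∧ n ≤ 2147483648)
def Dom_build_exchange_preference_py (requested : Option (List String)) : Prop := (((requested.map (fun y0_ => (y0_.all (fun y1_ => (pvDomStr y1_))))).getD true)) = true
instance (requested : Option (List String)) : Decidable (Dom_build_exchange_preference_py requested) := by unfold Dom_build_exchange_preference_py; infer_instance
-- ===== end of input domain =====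

-- B replaces A's two seen-accumulator loops and the trailing 'kraken' guard with a
-- filter-ahead nub over one candidate list (emit head, delete later duplicates); objective: alternative.


def BASE_EXCHANGE_PREFERENCE : List String := ["binance", "binanceus", "kraken", "kucoin"]

-- ===== PORT A =====
-- two append loops (requested lowered, then BASE), each with a membership check, then a 'kraken' guard
def build_exchange_preference_py (requested : Option (List String)) : List String :=
  -- 'if requested:' — None and [] both skip the loop, so getD [] is exact
  let reqList := requested.getD []
  let preference : List String :=
    reqList.foldl (fun pref ex =>
      let ex_lower := PySem.Str.lower ex
      if pref.contains ex_lower then pref else pref ++ [ex_lower]) []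
  let preference :=
    BASE_EXCHANGE_PREFERENCE.foldl (fun pref ex =>
      if pref.contains ex then pref else pref ++ [ex]) preference
  if preference.contains "kraken" then preference else preference ++ ["kraken"]

-- ===== PORT B =====
-- Source B's while loop: emit the head, filter its duplicates out of the rest, repeat on the rest
def nubAhead : List String → List String
  | [] => []
  | x :: xs => x :: nubAhead (xs.filter (fun y => y ≠ x))
termination_by l => l.length
decreasing_by
  simp
  exact le_trans (List.length_filter_le _ _) (by simp)

def build_exchange_preference_py_alt (requested : Option (List String)) : List String :=
  let rest := ((requested.getD []).map PySem.Str.lower) ++ BASE_EXCHANGE_PREFERENCE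
  nubAhead rest

-- ===== PRECONDITION & SPEC =====
def Spec_build_exchange_preference_py (requested : Option (List String)) (out : List String) : Prop := out = build_exchange_preference_py_alt requested
instance (requested : Option (List String)) (out : List String) : Decidable (Spec_build_exchange_preference_py requested out) := by unfold Spec_build_exchange_preference_py; infer_instance

-- ===== CLAIM (what is proved, stated in full; the proofs are below) =====
def Claim_equal_build_exchange_preference_py : Prop := ∀ (requested : Option (List String)), Dom_build_exchange_preference_py requested → Spec_build_exchange_preference_py requested (build_exchange_preference_py requested)

-- ===== LEMMAS AND PROOFS =====

theorem nubAhead_cons (y : String) (ys : List String) :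
    nubAhead (y :: ys) = y :: nubAhead (ys.filter (fun z => z ≠ y)) := by
  simp only [nubAhead]

-- A's seen-accumulator fold over l starting from s is s followed by the filter-ahead nub of
-- the elements of l not already in s
theorem foldl_eq_nubAhead (l : List String) : ∀ s : List String,
    l.foldl (fun pref ex => if pref.contains ex then pref else pref ++ [ex]) s
      = s ++ nubAhead (l.filter (fun x => ¬ s.contains x)) := by
  induction l with
  | nil => intro s; simp [nubAhead]
  | cons y ys ih =>
    intro s
    rw [List.foldl_cons, List.filter_cons]
    by_cases hy : y ∈ s
    · rw [if_pos (by simpa [List.contains_eq_mem] using hy), if_neg (by simp [List.contains_eq_mem, hy]), ih s]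
    · rw [if_neg (by simpa [List.contains_eq_mem] using hy), if_pos (by simp [List.contains_eq_mem, hy]),
        ih (s ++ [y]), nubAhead_cons, List.append_assoc, List.singleton_append, List.filter_filter]
      congr 3
      apply List.filter_congr
      intro x _
      by_cases hx : x = y <;> by_cases hs : x ∈ s <;>
        simp [List.contains_eq_mem, hx, hs]

-- every element of l appears in its filter-ahead nub (length-bounded induction follows nubAhead's recursion)
theorem mem_nubAhead_aux : ∀ (n : Nat) (l : List String), l.length ≤ n → ∀ x, x ∈ l → x ∈ nubAhead l := by
  intro n
  induction n with
  | zero =>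
    intro l hl x hx
    have hnil : l = [] := List.eq_nil_of_length_eq_zero (Nat.le_zero.mp hl)
    subst hnil; cases hx
  | succ n ih =>
    intro l hl x hx
    cases l with
    | nil => cases hx
    | cons y ys =>
      rw [nubAhead_cons]
      rcases List.mem_cons.mp hx with rfl | hx
      · exact List.mem_cons_self
      · by_cases hxy : x = y
        · simp [hxy]
        · refine List.mem_cons_of_mem _ (ih _ ?_ _ ?_)
          · exact le_trans (List.length_filter_le _ _) (Nat.le_of_succ_le_succ hl)
          · simp [List.mem_filter, hx, hxy]

theorem mem_nubAhead (x : String) (l : List String) (h : x ∈ l) : x ∈ nubAhead l :=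
  mem_nubAhead_aux l.length l le_rfl x h

-- ===== VERDICT (by name: the statement is the Claim_ definition above) =====
theorem build_exchange_preference_py_spec : Claim_equal_build_exchange_preference_py := by
  intro requested _
  unfold Spec_build_exchange_preference_py build_exchange_preference_py build_exchange_preference_py_alt
  simp only []
  have key : BASE_EXCHANGE_PREFERENCE.foldl (fun pref ex => if pref.contains ex then pref else pref ++ [ex])
      ((requested.getD []).foldl (fun pref ex =>
        if pref.contains (PySem.Str.lower ex) then pref else pref ++ [PySem.Str.lower ex]) [])
      = nubAhead (((requested.getD []).map PySem.Str.lower) ++ BASE_EXCHANGE_PREFERENCE) := by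
    have h1 := foldl_eq_nubAhead (((requested.getD []).map PySem.Str.lower) ++ BASE_EXCHANGE_PREFERENCE) []
    rw [List.foldl_append, List.foldl_map] at h1
    simpa using h1
  rw [key]
  have hk : "kraken" ∈ nubAhead (((requested.getD []).map PySem.Str.lower) ++ BASE_EXCHANGE_PREFERENCE) := by
    apply mem_nubAhead
    simp [BASE_EXCHANGE_PREFERENCE]
  rw [if_pos (by simpa [List.contains_eq_mem] using hk)]
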